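-- pv_equiv track=rewrite | github.com/jve89/ghost-employee | app/parser/rule_parser.py | extract_tasks_from_text
-- ===== SOURCE A (Python) =====
-- def extract_tasks_from_text(text: str) -> list[str]:
--     """
--     Extracts task-relevant lines from input text using simple keyword matching.
--     Used by jobs like Compliance Assistant to detect follow-ups.
--     """
--     keywords = [
--         "non-compliance", "incident", "follow-up", "audit", "deadline",
--         "escalation", "report", "corrective action", "violation", "breach"
--     ]
--     lines = text.splitlines()
--     return [
--         line.strip() for line in lines
--         if any(kw in line.lower() for kw in keywords)
--     ]
-- ===== SOURCE B (Python) =====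
-- KEYWORDS = [
--     "non-compliance", "incident", "follow-up", "audit", "deadline",
--     "escalation", "report", "corrective action", "violation", "breach"
-- ]
--
--
-- def extract_tasks_from_text(text: str) -> list[str]:
--     lines = text.splitlines()
--     lows = [line.lower() for line in lines]
--     hit = set()
--     for kw in KEYWORDS:
--         for i, low in enumerate(lows):
--             if kw in low:
--                 hit.add(i)
--     return [line.strip() for i, line in enumerate(lines) if i in hit]
-- ===== Notes on version B (the rewrite author's own statement) =====
-- stated objective: alternative
-- what changed: Inverts the traversal: instead of A's line-major comprehension testing all ten keywords inside each line's filter, B lowers every line once, runs a keyword-major outer loop that collects a set of matching line indices, and then a final indexed pass emits the stripped lines in order.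
import Mathlib
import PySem

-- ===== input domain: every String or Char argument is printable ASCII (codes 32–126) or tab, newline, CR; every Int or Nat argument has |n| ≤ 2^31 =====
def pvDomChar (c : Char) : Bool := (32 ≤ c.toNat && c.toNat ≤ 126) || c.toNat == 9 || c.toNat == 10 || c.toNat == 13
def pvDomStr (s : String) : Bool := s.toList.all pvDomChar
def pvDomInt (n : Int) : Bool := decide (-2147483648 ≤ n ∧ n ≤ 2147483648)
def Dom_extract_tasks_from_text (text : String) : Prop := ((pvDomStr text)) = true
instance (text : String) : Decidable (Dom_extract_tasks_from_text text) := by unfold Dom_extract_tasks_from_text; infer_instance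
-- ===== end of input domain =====

-- B inverts the traversal: it lowers each line once, then a keyword-major loop
-- collects the set of matching line indices, and a final indexed pass emits the
-- stripped lines in order; same return value, proved equal on all of Dom.

-- ===== PORT A =====
def pvKeywords : List String :=
  ["non-compliance", "incident", "follow-up", "audit", "deadline",
   "escalation", "report", "corrective action", "violation", "breach"]

def extract_tasks_from_text (text : String) : List String :=
  ((PySem.Str.splitlines text).filter
      (fun line => pvKeywords.any (fun kw => PySem.Str.isIn kw (PySem.Str.lower line)))).map
    PySem.Str.strip

-- ===== PORT B =====
def extract_tasks_from_text_alt (text : String) : List String :=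
  let lines := PySem.Str.splitlines text
  let lows := lines.map PySem.Str.lower
  let hit : PySem.Set Int :=
    pvKeywords.foldl
      (fun hit kw =>
        (PySem.List.enumerate lows).foldl
          (fun h p => if PySem.Str.isIn kw p.2 then PySem.Set.add h p.1 else h) hit)
      PySem.Set.empty
  ((PySem.List.enumerate lines).filter (fun p => PySem.Set.contains hit p.1)).map
    (fun p => PySem.Str.strip p.2)

-- ===== PRECONDITION & SPEC =====
def Spec_extract_tasks_from_text (text : String) (out : List String) : Prop := out = extract_tasks_from_text_alt text
instance (text : String) (out : List String) : Decidable (Spec_extract_tasks_from_text text out) := by unfold Spec_extract_tasks_from_text; infer_instance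

-- ===== CLAIM (what is proved, stated in full; the proofs are below) =====
def Claim_equal_extract_tasks_from_text : Prop := ∀ (text : String), Dom_extract_tasks_from_text text → Spec_extract_tasks_from_text text (extract_tasks_from_text text)

-- ===== LEMMAS AND PROOFS =====

-- membership in the hit set built by B's inner (per-keyword) loop
theorem pv_mem_inner (kw : String) (elems : List (Int × String))
    (h0 : PySem.Set Int) (i : Int) :
    (i ∈ elems.foldl
        (fun h p => if PySem.Str.isIn kw p.2 then PySem.Set.add h p.1 else h) h0) ↔
      i ∈ h0 ∨ ∃ p ∈ elems, p.1 = i ∧ PySem.Str.isIn kw p.2 = true := by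
  induction elems generalizing h0 with
  | nil => simp
  | cons q t ih =>
    simp only [List.foldl_cons, List.mem_cons]
    by_cases hq : PySem.Str.isIn kw q.2 = true
    · rw [if_pos hq, ih]
      rw [PySem.Set.mem_add]
      constructor
      · rintro ((h | h) | h)
        · exact Or.inl h
        · exact Or.inr ⟨q, Or.inl rfl, h.symm, hq⟩
        · rcases h with ⟨p, hp, hpi, hin⟩; exact Or.inr ⟨p, Or.inr hp, hpi, hin⟩
      · rintro (h | ⟨p, hp | hp, hpi, hin⟩)
        · exact Or.inl (Or.inl h)
        · subst hp; exact Or.inl (Or.inr hpi.symm)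
        · exact Or.inr ⟨p, hp, hpi, hin⟩
    · rw [if_neg hq, ih]
      constructor
      · rintro (h | h)
        · exact Or.inl h
        · rcases h with ⟨p, hp, hpi, hin⟩; exact Or.inr ⟨p, Or.inr hp, hpi, hin⟩
      · rintro (h | ⟨p, hp | hp, hpi, hin⟩)
        · exact Or.inl h
        · subst hp; exact absurd hin hq
        · exact Or.inr ⟨p, hp, hpi, hin⟩

-- membership in the full hit set built by B's keyword-major double loop
theorem pv_mem_hit (kws : List String) (elems : List (Int × String))
    (h0 : PySem.Set Int) (i : Int) :
    (i ∈ kws.foldl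
        (fun hit kw =>
          elems.foldl
            (fun h p => if PySem.Str.isIn kw p.2 then PySem.Set.add h p.1 else h) hit) h0) ↔
      i ∈ h0 ∨ ∃ kw ∈ kws, ∃ p ∈ elems, p.1 = i ∧ PySem.Str.isIn kw p.2 = true := by
  induction kws generalizing h0 with
  | nil => simp
  | cons kw t ih =>
    simp only [List.foldl_cons, ih, pv_mem_inner, List.mem_cons]
    constructor
    · rintro ((h | ⟨p, hp, hpi, hin⟩) | ⟨k, hk, hrest⟩)
      · exact Or.inl h
      · exact Or.inr ⟨kw, Or.inl rfl, p, hp, hpi, hin⟩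
      · exact Or.inr ⟨k, Or.inr hk, hrest⟩
    · rintro (h | ⟨k, hk | hk, hrest⟩)
      · exact Or.inl (Or.inl h)
      · subst hk; exact Or.inl (Or.inr hrest)
      · exact Or.inr ⟨k, hk, hrest⟩

-- filtering enumerated pairs by a predicate on the element, then projecting
theorem pv_filter_enumerate {α β : Type} (xs : List α) (q : α → Bool) (f : α → β) (s : Int) :
    ((PySem.List.enumerate xs s).filter (fun p => q p.2)).map (fun p => f p.2)
      = (xs.filter q).map f := by
  induction xs generalizing s with
  | nil => simp [PySem.List.enumerate_nil]
  | cons x t ih =>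
    rw [PySem.List.enumerate_cons]
    simp only [List.filter_cons]
    by_cases hx : q x = true
    · simp [hx, ih]
    · simpa [hx] using ih (s + 1)

-- ===== VERDICT (by name: the statement is the Claim_ definition above) =====
theorem extract_tasks_from_text_spec : Claim_equal_extract_tasks_from_text := by
  intro text _
  unfold Spec_extract_tasks_from_text extract_tasks_from_text extract_tasks_from_text_alt
  dsimp only
  set lines := PySem.Str.splitlines text with hlines
  -- replace B's index-membership filter by the element predicate, pointwise on members
  rw [List.filter_congr (l := PySem.List.enumerate lines 0)
      (q := fun p => pvKeywords.any (fun kw => PySem.Str.isIn kw (PySem.Str.lower p.2)))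
      ?_]
  · exact (pv_filter_enumerate lines _ PySem.Str.strip 0).symm
  · intro p hp
    rcases (PySem.List.mem_enumerate_iff _ _ _).mp hp with ⟨k, hk, rfl⟩
    have hmem : (PySem.Set.contains
        (pvKeywords.foldl
          (fun hit kw =>
            (PySem.List.enumerate (lines.map PySem.Str.lower)).foldl
              (fun h p => if PySem.Str.isIn kw p.2 then PySem.Set.add h p.1 else h) hit)
          PySem.Set.empty) ((0 : Int) + k)) = true ↔
        ∃ kw ∈ pvKeywords, PySem.Str.isIn kw (PySem.Str.lower lines[k]) = true := by
      rw [PySem.Set.contains_iff, pv_mem_hit]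
      constructor
      · rintro (h | ⟨kw, hkw, q, hq, hqi, hin⟩)
        · exact absurd h (by simp [PySem.Set.empty])
        · rcases (PySem.List.mem_enumerate_iff _ _ _).mp hq with ⟨j, hj, rfl⟩
          simp only [List.getElem_map] at hin
          have : j = k := by
            have := hqi; simp at this; omega
          subst this
          exact ⟨kw, hkw, hin⟩
      · rintro ⟨kw, hkw, hin⟩
        refine Or.inr ⟨kw, hkw, ((0 : Int) + k, PySem.Str.lower lines[k]), ?_, rfl, hin⟩
        refine (PySem.List.mem_enumerate_iff _ _ _).mpr ⟨k, by simpa using hk, ?_⟩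
        simp
    dsimp only
    rcases Bool.eq_false_or_eq_true (pvKeywords.any (fun kw => PySem.Str.isIn kw (PySem.Str.lower lines[k]))) with h | h
    all_goals rw [h]
    · exact hmem.mpr (by rcases List.any_eq_true.mp h with ⟨kw, hkw, hin⟩; exact ⟨kw, hkw, hin⟩)
    · rw [Bool.eq_false_iff]
      intro hc
      rcases hmem.mp hc with ⟨kw, hkw, hin⟩
      have hx : pvKeywords.any (fun kw => PySem.Str.isIn kw (PySem.Str.lower lines[k])) = true :=
        List.any_eq_true.mpr ⟨kw, hkw, hin⟩
      exact absurd (hx.symm.trans h) (by decide)
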